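-- pv_equiv track=rewrite | github.com/acharles7/problem-solving | Pure/numbers_game.py | consecutive_one
-- ===== SOURCE A (Python) =====
-- def consecutive_one(num):
--     ONES_POINT = 5
--     i = 0
--     points = 0
--     while i < len(num):
--         if num[i] == '1':
--             ones = 0
--             while i < len(num) and num[i] == '1':
--                 ones += 1
--                 i += 1
--                 if ones == 2:
--                     points += ONES_POINT
--                 elif ones > 2:
--                     points += ONES_POINT
--         else:
--             i += 1
--     return points
-- ===== SOURCE B (Python) =====
-- def consecutive_one(num):
--     return 5 * sum(1 for a, b in zip(num, num[1:]) if a == '1' and b == '1')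
-- ===== Notes on version B (the rewrite author's own statement) =====
-- stated objective: simpler
-- what changed: Replaces the nested run-tracking while loops and the run-length counter with a single flat scan counting adjacent pairs of the character 1, scoring 5 per pair.
import Mathlib
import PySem

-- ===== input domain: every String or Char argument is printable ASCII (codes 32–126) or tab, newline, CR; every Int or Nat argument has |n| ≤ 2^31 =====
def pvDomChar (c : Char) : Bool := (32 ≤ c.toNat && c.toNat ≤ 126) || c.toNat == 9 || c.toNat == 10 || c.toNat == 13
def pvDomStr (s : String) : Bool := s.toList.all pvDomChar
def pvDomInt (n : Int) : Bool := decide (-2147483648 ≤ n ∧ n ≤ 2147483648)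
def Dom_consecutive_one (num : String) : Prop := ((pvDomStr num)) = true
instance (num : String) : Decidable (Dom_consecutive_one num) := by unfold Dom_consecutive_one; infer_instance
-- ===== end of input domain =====

-- ===== PORT A =====
-- B replaces A's nested run-tracking loops by one flat count of adjacent ('1','1') pairs (simpler; same cost).
-- Inner while loop of A: consumes the leading '1's, counting them in `ones`
-- and adding 5 points for each one after entering (ones == 2 / ones > 2 branches);
-- returns the remaining suffix and the updated points (suffix = position i).
def innerA : List Char → Nat → Int → (List Char × Int)
  | c :: rest, ones, points =>
      if c = '1' then
        let ones' := ones + 1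
        let points' := if ones' = 2 then points + 5
                       else if ones' > 2 then points + 5
                       else points
        innerA rest ones' points'
      else (c :: rest, points)
  | [], _, points => ([], points)

theorem innerA_length_le : ∀ (xs : List Char) (ones : Nat) (points : Int),
    (innerA xs ones points).1.length ≤ xs.length := by
  intro xs
  induction xs with
  | nil => intro _ _; simp [innerA]
  | cons c rest ih =>
    intro ones points
    by_cases h : c = '1'
    · simp only [innerA, if_pos h]
      exact le_trans (ih _ _) (Nat.le_succ _)
    · simp [innerA, if_neg h]

-- Outer while loop of A, over the remaining suffix of the string.
def outerA (xs : List Char) (points : Int) : Int :=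
  match xs with
  | [] => points
  | c :: rest =>
      if hc : c = '1' then
        let r := innerA (c :: rest) 0 points
        outerA r.1 r.2
      else outerA rest points
  termination_by xs.length
  decreasing_by
  · simp only [innerA, if_pos hc]
    exact Nat.lt_succ_of_le (innerA_length_le rest 1 points)
  · simp

def consecutive_one (num : String) : Int := outerA num.toList 0

-- ===== PORT B =====
def consecutive_one_alt (num : String) : Int :=
  5 * (((num.toList.zip num.toList.tail).countP
          (fun p => p.1 = '1' ∧ p.2 = '1')) : Int)

-- ===== PRECONDITION & SPEC =====
def Spec_consecutive_one (num : String) (out : Int) : Prop := out = consecutive_one_alt num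
instance (num : String) (out : Int) : Decidable (Spec_consecutive_one num out) := by unfold Spec_consecutive_one; infer_instance

-- ===== CLAIM (what is proved, stated in full; the proofs are below) =====
def Claim_equal_consecutive_one : Prop := ∀ (num : String), Dom_consecutive_one num → Spec_consecutive_one num (consecutive_one num)

-- ===== LEMMAS AND PROOFS =====

-- number of adjacent ('1','1') pairs, structurally
def pairs : List Char → Nat
  | a :: b :: r => (if a = '1' ∧ b = '1' then 1 else 0) + pairs (b :: r)
  | _ => 0

theorem pairs_eq_countP : ∀ xs : List Char,
    pairs xs = (xs.zip xs.tail).countP (fun p => p.1 = '1' ∧ p.2 = '1') := by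
  intro xs
  match xs with
  | [] => simp [pairs]
  | [a] => simp [pairs]
  | a :: b :: r =>
    simp only [pairs, List.tail_cons, List.zip_cons_cons, List.countP_cons,
      pairs_eq_countP (b :: r)]
    by_cases h : a = '1' ∧ b = '1' <;> simp [h] <;> omega

theorem innerA_eq : ∀ (xs : List Char) (ones : Nat) (points : Int), 1 ≤ ones →
    innerA xs ones points
      = (xs.dropWhile (· = '1'), points + 5 * (xs.takeWhile (· = '1')).length) := by
  intro xs
  induction xs with
  | nil => intro _ p _; simp [innerA]
  | cons c rest ih =>
    intro ones points h1
    by_cases hc : c = '1'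
    · have h2 : ¬ (ones + 1 = 2) ∨ ones + 1 = 2 := by omega
      simp only [innerA, ih (ones + 1) _ (by omega),
        List.dropWhile_cons, List.takeWhile_cons, hc]
      simp only [decide_true, if_true]
      have : (if ones + 1 = 2 then points + 5
              else if ones + 1 > 2 then points + 5 else points) = points + 5 := by
        rcases h2 with h | h
        · rw [if_neg h, if_pos (by omega)]
        · rw [if_pos h]
      rw [this]
      simp [mul_add]
      ring
    · simp [innerA, hc]

theorem pairs_one_cons : ∀ rest : List Char,
    pairs ('1' :: rest)
      = (rest.takeWhile (· = '1')).length + pairs (rest.dropWhile (· = '1')) := by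
  intro rest
  induction rest with
  | nil => simp [pairs]
  | cons b r ih =>
    by_cases hb : b = '1'
    · subst hb
      simp only [pairs, List.takeWhile_cons, List.dropWhile_cons, decide_true,
        if_true]
      simp only [ih]
      simp
      omega
    · simp [pairs, hb]

theorem outerA_eq : ∀ (n : Nat) (xs : List Char), xs.length ≤ n → ∀ (points : Int),
    outerA xs points = points + 5 * pairs xs := by
  intro n
  induction n with
  | zero =>
    intro xs hx points
    have : xs = [] := List.eq_nil_of_length_eq_zero (Nat.le_zero.mp hx)
    subst this; simp [outerA, pairs]
  | succ n ih =>
    intro xs hx points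
    match xs with
    | [] => simp [outerA, pairs]
    | c :: rest =>
      by_cases hc : c = '1'
      · rw [outerA]
        simp only [dif_pos hc]
        have hin : innerA (c :: rest) 0 points
            = (rest.dropWhile (· = '1'), points + 5 * (rest.takeWhile (· = '1')).length) := by
          simp only [innerA, if_pos hc]
          norm_num
          exact innerA_eq rest 1 points (le_refl 1)
        rw [hin]
        have hlen : (rest.dropWhile (· = '1')).length ≤ n := by
          have := List.length_dropWhile_le (p := (· = '1')) (l := rest)
          simp at hx; omega
        rw [ih _ hlen]
        subst hc
        rw [pairs_one_cons]
        push_cast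
        ring
      · rw [outerA]
        simp only [dif_neg hc]
        have hlen : rest.length ≤ n := by simp at hx; omega
        rw [ih _ hlen]
        have : pairs (c :: rest) = pairs rest := by
          match rest with
          | [] => simp [pairs]
          | b :: r => simp [pairs, hc]
        rw [this]

-- ===== VERDICT (by name: the statement is the Claim_ definition above) =====
theorem consecutive_one_spec : Claim_equal_consecutive_one := by
  intro num _
  unfold Spec_consecutive_one consecutive_one consecutive_one_alt
  rw [outerA_eq num.toList.length num.toList (le_refl _) 0, pairs_eq_countP]
  ring
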